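-- pv_equiv track=rewrite | github.com/DevRyu/DaliyCode | Python/maxInversions.py | maxInversions
-- ===== SOURCE A (Python) =====
-- def maxInversions(prices):
--     count = 0
--     length_price = len(prices)
--     for i in range(1, length_price - 1):
--         top = 0
--
--         for j in range(i - 1, -1, -1):
--             if prices[i] < prices[j]:
--                 top += 1
--
--         bottom = 0
--         for j in range(i + 1, length_price):
--             if prices[i] > prices[j]:
--                 bottom += 1
--
--         count += top * bottom
--
--     return count
-- ===== SOURCE B (Python) =====
-- def maxInversions(prices):
--     # One nested left-to-right pass: for each position we count, among earlier
--     # elements, those greater than it (its "top" count), and at the same time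
--     # add the already-known top counts of every earlier greater element --
--     # which accumulates exactly top*bottom summed over middle indices.
--     ans = 0
--     left = []
--     for v in prices:
--         c = 0
--         for pj, lj in zip(prices, left):
--             if pj > v:
--                 c += 1
--                 ans += lj
--         left.append(c)
--     return ans
-- ===== Notes on version B (the rewrite author's own statement) =====
-- stated objective: alternative
-- what changed: Instead of recomputing, for every middle index, a backward left-greater scan and a forward right-smaller scan, B makes one nested left-to-right pass that maintains the running list of left-greater counts and accumulates the answer pairwise (ans += left[j] whenever prices[j] > prices[k]), summing the same triple count in a different order.
import Mathlib
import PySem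

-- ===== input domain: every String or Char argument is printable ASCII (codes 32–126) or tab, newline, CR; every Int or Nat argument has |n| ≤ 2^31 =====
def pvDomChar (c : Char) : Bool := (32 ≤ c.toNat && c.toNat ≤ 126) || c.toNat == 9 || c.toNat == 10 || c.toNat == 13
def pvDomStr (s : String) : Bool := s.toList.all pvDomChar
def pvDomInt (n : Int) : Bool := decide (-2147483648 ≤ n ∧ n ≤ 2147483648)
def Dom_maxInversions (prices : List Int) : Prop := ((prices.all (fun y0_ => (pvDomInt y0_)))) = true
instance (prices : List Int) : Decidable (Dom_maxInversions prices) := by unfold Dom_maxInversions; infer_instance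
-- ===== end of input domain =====

-- B replaces A's per-middle backward/forward scans by one nested left-to-right pass
-- that maintains the list of left-greater counts and accumulates the answer pairwise
-- (alternative decomposition of the same O(n^2) triple count).


-- ===== PORT A =====
def maxInversions (prices : List Int) : Int :=
  let n : Int := prices.length
  (PySem.List.pyRange 1 (n - 1) 1).foldl (fun count i =>
    let top : Int := (PySem.List.pyRange (i - 1) (-1) (-1)).foldl
      (fun t j => if PySem.List.pyGetD prices i 0 < PySem.List.pyGetD prices j 0 then t + 1 else t) 0
    let bottom : Int := (PySem.List.pyRange (i + 1) n 1).foldl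
      (fun b j => if PySem.List.pyGetD prices i 0 > PySem.List.pyGetD prices j 0 then b + 1 else b) 0
    count + top * bottom) 0

-- ===== PORT B =====
def maxInversions_alt (prices : List Int) : Int :=
  (prices.foldl (fun (st : Int × List Int) v =>
      let q := (prices.zip st.2).foldl
        (fun (q : Int × Int) pl => if pl.1 > v then (q.1 + 1, q.2 + pl.2) else q) (0, st.1)
      (q.2, st.2 ++ [q.1])) ((0 : Int), ([] : List Int))).1

-- ===== PRECONDITION & SPEC =====
def Spec_maxInversions (prices : List Int) (out : Int) : Prop := out = maxInversions_alt prices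
instance (prices : List Int) (out : Int) : Decidable (Spec_maxInversions prices out) := by unfold Spec_maxInversions; infer_instance

-- ===== CLAIM (what is proved, stated in full; the proofs are below) =====
def Claim_equal_maxInversions : Prop := ∀ (prices : List Int), Dom_maxInversions prices → Spec_maxInversions prices (maxInversions prices)

-- ===== LEMMAS AND PROOFS =====

/-- `p[j]` as a total function (indices in range everywhere we use it). -/
def pvIdx (p : List Int) (j : Nat) : Int := p.getD j 0

/-- Number of earlier elements greater than `p[j]` ("top" in A, `left[j]` in B). -/
def pvL (p : List Int) (j : Nat) : Int :=
  ((List.range j).countP (fun i => decide (pvIdx p j < pvIdx p i)) : Int)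

/-- Number of later elements smaller than `p[j]` ("bottom" in A). -/
def pvR (p : List Int) (j : Nat) : Int :=
  ((List.range (p.length - (j + 1))).countP
    (fun t => decide (pvIdx p (j + 1 + t) < pvIdx p j)) : Int)

-- bridge: an Int-cast countP over List.range is a 0/1 Finset sum
theorem pv_countP_range_sum (m : Nat) (q : Nat → Bool) :
    ((List.range m).countP q : Int) = ∑ i ∈ Finset.range m, (if q i then (1 : Int) else 0) := by
  induction m with
  | zero => simp
  | succ m ih =>
      rw [List.range_succ, List.countP_append, Finset.sum_range_succ, ← ih]
      simp [List.countP_cons]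

-- bridge: summing g over the filtered List.range is an ite Finset sum
theorem pv_sum_map_filter_range (m : Nat) (q : Nat → Bool) (g : Nat → Int) :
    (((List.range m).filter q).map g).sum = ∑ i ∈ Finset.range m, (if q i then g i else 0) := by
  induction m with
  | zero => simp
  | succ m ih =>
      rw [List.range_succ, List.filter_append, List.map_append, List.sum_append,
        Finset.sum_range_succ, ih]
      by_cases h : q m <;> simp [h]

theorem pv_take_eq_map_range (p : List Int) (k : Nat) (h : k ≤ p.length) :
    p.take k = (List.range k).map (fun j => pvIdx p j) := by
  refine List.ext_getElem (by simp [h]) ?_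
  intro i h1 h2
  have hip : i < p.length := by simp at h1; omega
  simp [pvIdx, List.getD_eq_getElem?_getD, List.getElem?_eq_getElem hip]

theorem pv_zip_truncate (l1 l2 : List Int) : l1.zip l2 = (l1.take l2.length).zip l2 := by
  induction l1 generalizing l2 with
  | nil => simp
  | cons x xs ih =>
      cases l2 with
      | nil => simp
      | cons y ys => simpa using ih ys

-- B's inner fold: counts matches and adds the matched second components
theorem pv_inner_fold (v : Int) (z : List (Int × Int)) (c0 a0 : Int) :
    z.foldl (fun (q : Int × Int) pl => if pl.1 > v then (q.1 + 1, q.2 + pl.2) else q) (c0, a0)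
      = (c0 + (z.countP (fun pl => decide (pl.1 > v)) : Int),
         a0 + ((z.filter (fun pl => decide (pl.1 > v))).map (·.2)).sum) := by
  induction z generalizing c0 a0 with
  | nil => simp
  | cons pl z ih =>
      by_cases h : pl.1 > v
      · simp only [List.foldl_cons, if_pos h, ih, List.countP_cons, List.filter_cons]
        simp [h]; constructor <;> ring
      · simp only [List.foldl_cons, if_neg h, ih, List.countP_cons, List.filter_cons]
        simp [h]

-- a List.range map-sum is the corresponding Finset sum (definitional)
theorem pv_sum_range (m : Nat) (f : Nat → Int) :
    ((List.range m).map f).sum = ∑ i ∈ Finset.range m, f i := rfl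

-- A's backward scan at middle index 1+k counts the earlier greater elements
theorem pv_top_eq (p : List Int) (k : Nat) :
    ((PySem.List.pyRange ((1 + (k : Int)) - 1) (-1) (-1)).countP
      (fun j => decide (PySem.List.pyGetD p (1 + (k : Int)) 0 < PySem.List.pyGetD p j 0)) : Int)
      = pvL p (k + 1) := by
  have h1 : (1 + (k : Int)) - 1 = (k : Int) := by ring
  rw [h1, PySem.List.pyRange_neg_one_eq_reverse, List.countP_reverse]
  have h2 : (-1 : Int) + 1 = 0 := by ring
  have h3 : (k : Int) + 1 = ((k + 1 : Nat) : Int) := by push_cast; ring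
  rw [h2, h3, PySem.List.pyRange_zero_natCast, List.countP_map]
  have h4 : (1 + (k : Int)) = ((k + 1 : Nat) : Int) := by push_cast; ring
  simp only [pvL, Function.comp_def, h4, PySem.List.pyGetD_natCast, pvIdx]
  rfl

-- A's forward scan at middle index 1+k counts the later smaller elements
theorem pv_bottom_eq (p : List Int) (k : Nat) (hk : k + 2 ≤ p.length) :
    ((PySem.List.pyRange ((1 + (k : Int)) + 1) (p.length : Int) 1).countP
      (fun j => decide (PySem.List.pyGetD p (1 + (k : Int)) 0 > PySem.List.pyGetD p j 0)) : Int)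
      = pvR p (k + 1) := by
  rw [PySem.List.pyRange_one, List.countP_map]
  have h1 : (((p.length : Int)) - (1 + (k : Int) + 1)).toNat = p.length - (k + 2) := by omega
  rw [h1]
  simp only [pvR, Function.comp_def, pvIdx]
  apply congrArg
  apply List.countP_congr
  intro t ht
  have h2 : (1 + (k : Int) + 1 + (t : Int)) = ((k + 1 + 1 + t : Nat) : Int) := by push_cast; ring
  have h3 : (1 + (k : Int)) = ((k + 1 : Nat) : Int) := by push_cast; ring
  rw [h2, h3, PySem.List.pyGetD_natCast, PySem.List.pyGetD_natCast]
  simp [gt_iff_lt]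

-- characterisation of A as a sum over all indices
theorem pv_A_eq (p : List Int) :
    maxInversions p = ∑ j ∈ Finset.range p.length, pvL p j * pvR p j := by
  simp only [maxInversions, PySem.List.foldl_ite_add_one, PySem.List.foldl_add, zero_add]
  match hL : p.length with
  | 0 => simp [PySem.List.pyRange_one_eq_nil]
  | 1 => simp [PySem.List.pyRange_one_eq_nil, pvL, pvIdx]
  | (m + 2) =>
    have hcast : ((m + 2 : Nat) : Int) - 1 = 1 + (m : Int) := by push_cast; ring
    rw [hcast, PySem.List.pyRange_one]
    have hm : ((1 : Int) + (m : Int) - 1).toNat = m := by omega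
    rw [hm, List.map_map, pv_sum_range]
    rw [Finset.sum_range_succ, Finset.sum_range_succ']
    have hG0 : pvL p 0 * pvR p 0 = 0 := by simp [pvL]
    have hGtop : pvL p (m + 1) * pvR p (m + 1) = 0 := by
      have : p.length - (m + 1 + 1) = 0 := by omega
      simp [pvR, this]
    rw [hG0, hGtop]
    simp only [Function.comp_def, add_zero]
    refine Finset.sum_congr rfl (fun k hk => ?_)
    have hk' : k + 2 ≤ p.length := by simp at hk; omega
    rw [pv_top_eq p k, show ((m + 2 : Nat) : Int) = (p.length : Int) by rw [hL],
      pv_bottom_eq p k hk']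

-- B's loop invariant: after k steps the state holds the partial answer and left counts
theorem pv_B_inv (p : List Int) (k : Nat) (hk : k ≤ p.length) :
    (p.take k).foldl (fun (st : Int × List Int) v =>
      let q := (p.zip st.2).foldl
        (fun (q : Int × Int) pl => if pl.1 > v then (q.1 + 1, q.2 + pl.2) else q) (0, st.1)
      (q.2, st.2 ++ [q.1])) ((0 : Int), ([] : List Int))
    = (∑ k' ∈ Finset.range k, ∑ j ∈ Finset.range k',
         (if pvIdx p k' < pvIdx p j then pvL p j else 0),
       (List.range k).map (fun j => pvL p j)) := by
  induction k with
  | zero => simp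
  | succ k ih =>
      have hk' : k < p.length := hk
      have hkle : k ≤ p.length := le_of_lt hk'
      rw [List.take_add_one, List.getElem?_eq_getElem hk', List.foldl_append, ih hkle]
      simp only [Option.toList_some, List.foldl_cons, List.foldl_nil]
      have hv : p[k] = pvIdx p k := by
        simp [pvIdx, List.getD_eq_getElem?_getD, List.getElem?_eq_getElem hk']
      have hzip : p.zip ((List.range k).map (fun j => pvL p j))
          = (List.range k).map (fun j => (pvIdx p j, pvL p j)) := by
        rw [pv_zip_truncate]
        simp only [List.length_map, List.length_range]
        rw [pv_take_eq_map_range p k hkle, List.zip_map']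
      rw [hzip, hv, pv_inner_fold]
      simp only [Prod.mk.injEq]
      constructor
      · rw [Finset.sum_range_succ]
        congr 1
        rw [List.filter_map, List.map_map]
        have : ((·.2) ∘ fun j => (pvIdx p j, pvL p j)) = fun j => pvL p j := rfl
        rw [this, pv_sum_map_filter_range]
        refine Finset.sum_congr rfl (fun j _ => ?_)
        simp [Function.comp, gt_iff_lt]
      · rw [List.countP_map, List.range_succ, List.map_append]
        simp [pvL, Function.comp_def, gt_iff_lt]

-- B's characterisation: the pairwise accumulation over all prefixes
theorem pv_B_eq (p : List Int) :
    maxInversions_alt p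
      = ∑ k ∈ Finset.range p.length, ∑ j ∈ Finset.range k,
          (if pvIdx p k < pvIdx p j then pvL p j else 0) := by
  have h := pv_B_inv p p.length le_rfl
  rw [List.take_length] at h
  simp only [maxInversions_alt, h]

-- exchanging the order of summation over pairs j < k
theorem pv_swap (n : Nat) (h : Nat → Nat → Int) :
    ∑ k ∈ Finset.range n, ∑ j ∈ Finset.range k, h j k
      = ∑ j ∈ Finset.range n, ∑ k ∈ Finset.Ico (j + 1) n, h j k := by
  induction n with
  | zero => simp
  | succ n ih =>
      rw [Finset.sum_range_succ, ih, Finset.sum_range_succ]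
      rw [Finset.sum_congr rfl (fun j hj => Finset.sum_Ico_succ_top
        (by exact Nat.succ_le_of_lt (Finset.mem_range.mp hj)) (h j))]
      rw [Finset.sum_add_distrib]
      simp

-- ===== VERDICT (by name: the statement is the Claim_ definition above) =====
theorem maxInversions_spec : Claim_equal_maxInversions := by
  intro p _
  show maxInversions p = maxInversions_alt p
  rw [pv_A_eq, pv_B_eq, pv_swap]
  refine Finset.sum_congr rfl (fun j hj => ?_)
  have : ∀ k ∈ Finset.Ico (j + 1) p.length,
      (if pvIdx p k < pvIdx p j then pvL p j else 0)
        = pvL p j * (if pvIdx p k < pvIdx p j then (1 : Int) else 0) := by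
    intro k _; by_cases h : pvIdx p k < pvIdx p j <;> simp [h]
  rw [Finset.sum_congr rfl this, ← Finset.mul_sum]
  congr 1
  rw [Finset.sum_Ico_eq_sum_range, pvR, pv_countP_range_sum]
  simp
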